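-- pv_equiv track=rewrite | github.com/SuvroBaner/software_engineering | algorithms/longestStreakOfAdjacentOnes.py | longestStreakOfAdjacentOnes
-- ===== SOURCE A (Python) =====
-- def longestStreakOfAdjacentOnes(array):
--     zerosIdx = []
--     for i in range(len(array)):
--         if array[i] == 0:
--             zerosIdx.append(i)
--
--     if len(zerosIdx) == 0:
--         return -1
--
--     max_ones = []
--     for idx in zerosIdx:
--         leftIdx = idx - 1
--         count = 1
--         while leftIdx >= 0 and array[leftIdx] == 1:
--             count += 1
--             leftIdx -= 1
--         rightIdx = idx + 1
--         while rightIdx <= len(array) - 1 and array[rightIdx] == 1: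
--             count += 1
--             rightIdx += 1
--         max_ones.append(count)
--
--     largest = float("-inf")
--     final_idx = -1
--     for i in range(len(max_ones)):
--         if max_ones[i] > largest:
--             largest = max_ones[i]
--             final_idx = i
--
--     return zerosIdx[final_idx]
-- ===== SOURCE B (Python) =====
-- def longestStreakOfAdjacentOnes(array):
--     # prefix/suffix consecutive-ones run lengths, then one pass picking
--     # the first zero index with the largest 1 + left-run + right-run.
--     n = len(array)
--     left = [0] * (n + 1)   # left[i]  = length of the run of 1s ending just before index i
--     for i in range(n):
--         left[i + 1] = left[i] + 1 if array[i] == 1 else 0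
--     right = [0] * (n + 1)  # right[i] = length of the run of 1s starting at index i
--     for i in range(n - 1, -1, -1):
--         right[i] = right[i + 1] + 1 if array[i] == 1 else 0
--     best_idx = -1
--     best_count = None
--     for i, a in enumerate(array):
--         if a == 0:
--             c = 1 + left[i] + right[i + 1]
--             if best_count is None or c > best_count:
--                 best_count = c
--                 best_idx = i
--     return best_idx
-- ===== Notes on version B (the rewrite author's own statement) =====
-- stated objective: alternative
-- what changed: A rescans left and right from every zero with two while-loops; B precomputes prefix/suffix consecutive-ones run lengths once and answers each zero with a single lookup in one enumerate pass.
import Mathlib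
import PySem

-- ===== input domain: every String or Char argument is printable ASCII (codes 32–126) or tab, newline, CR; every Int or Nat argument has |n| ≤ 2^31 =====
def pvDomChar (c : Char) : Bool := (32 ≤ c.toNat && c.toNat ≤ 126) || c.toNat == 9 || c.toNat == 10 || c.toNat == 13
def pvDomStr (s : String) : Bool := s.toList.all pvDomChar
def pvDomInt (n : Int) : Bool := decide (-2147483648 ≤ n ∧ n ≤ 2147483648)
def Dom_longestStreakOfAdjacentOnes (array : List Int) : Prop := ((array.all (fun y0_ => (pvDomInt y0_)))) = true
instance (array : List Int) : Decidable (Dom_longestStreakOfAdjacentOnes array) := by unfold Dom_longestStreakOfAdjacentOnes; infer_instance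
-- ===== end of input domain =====

-- B replaces A's per-zero left/right while-loop scans by prefix/suffix
-- consecutive-ones run lengths precomputed once, with a single lookup per zero.


-- ===== PORT A =====
-- while leftIdx >= 0 and array[leftIdx] == 1: count += 1; leftIdx -= 1
def pvLeftLoop (array : List Int) (leftIdx count : Int) : Int :=
  if h : 0 ≤ leftIdx ∧ PySem.List.pyGetD array leftIdx 0 = 1 then
    pvLeftLoop array (leftIdx - 1) (count + 1)
  else count
termination_by (leftIdx + 1).toNat
decreasing_by omega

-- while rightIdx <= len(array) - 1 and array[rightIdx] == 1: count += 1; rightIdx += 1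
def pvRightLoop (array : List Int) (rightIdx count : Int) : Int :=
  if h : rightIdx ≤ (array.length : Int) - 1 ∧ PySem.List.pyGetD array rightIdx 0 = 1 then
    pvRightLoop array (rightIdx + 1) (count + 1)
  else count
termination_by ((array.length : Int) - rightIdx).toNat
decreasing_by omega

def longestStreakOfAdjacentOnes (array : List Int) : Int :=
  let zerosIdx := (PySem.List.pyRange 0 (array.length : Int) 1).foldl
      (fun acc i => if PySem.List.pyGetD array i 0 = 0 then acc ++ [i] else acc) []
  if zerosIdx.length = 0 then -1
  else
    let maxOnes := zerosIdx.foldl (fun acc idx =>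
        acc ++ [pvRightLoop array (idx + 1) (pvLeftLoop array (idx - 1) 1)]) []
    -- largest = float("-inf") is ported as 'none : Option Int'; exact, since every Int count exceeds -inf
    let fin := maxOnes.foldl (fun (st : Option Int × Int × Nat) v =>
        if (match st.1 with | none => true | some l => decide (l < v)) = true
        then (some v, ((st.2.2 : Nat) : Int), st.2.2 + 1)
        else (st.1, st.2.1, st.2.2 + 1)) (none, -1, 0)
    PySem.List.pyGetD zerosIdx fin.2.1 (-1)

-- ===== PORT B =====
-- left[i+1] = left[i] + 1 if array[i] == 1 else 0   (built left-to-right, carrying left[i])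
def pvBuildLeft : List Int → Int → List Int
  | [], _ => []
  | a :: rest, cur =>
    let v := if a = 1 then cur + 1 else 0
    v :: pvBuildLeft rest v

-- right[i] = right[i+1] + 1 if array[i] == 1 else 0  (built right-to-left; last entry is right[n] = 0)
def pvBuildRight : List Int → List Int
  | [] => [0]
  | a :: rest =>
    let r := pvBuildRight rest
    (if a = 1 then r.headD 0 + 1 else 0) :: r

def longestStreakOfAdjacentOnes_alt (array : List Int) : Int :=
  let left := 0 :: pvBuildLeft array 0
  let right := pvBuildRight array
  ((PySem.List.enumerate array 0).foldl
    (fun (st : Option Int × Int) (p : Int × Int) =>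
      if p.2 = 0 then
        let c := 1 + PySem.List.pyGetD left p.1 0 + PySem.List.pyGetD right (p.1 + 1) 0
        match st.1 with
        | none => (some c, p.1)
        | some b => if b < c then (some c, p.1) else st
      else st) (none, -1)).2

-- ===== PRECONDITION & SPEC =====
def Spec_longestStreakOfAdjacentOnes (array : List Int) (out : Int) : Prop := out = longestStreakOfAdjacentOnes_alt array
instance (array : List Int) (out : Int) : Decidable (Spec_longestStreakOfAdjacentOnes array out) := by unfold Spec_longestStreakOfAdjacentOnes; infer_instance

-- ===== CLAIM (what is proved, stated in full; the proofs are below) =====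
def Claim_equal_longestStreakOfAdjacentOnes : Prop := ∀ (array : List Int), Dom_longestStreakOfAdjacentOnes array → Spec_longestStreakOfAdjacentOnes array (longestStreakOfAdjacentOnes array)

-- ===== LEMMAS AND PROOFS =====

-- run of ones ending just before index i
def lrun (a : List Int) : Nat → Int
  | 0 => 0
  | i + 1 => if a.getD i 0 = 1 then lrun a i + 1 else 0

-- run of ones starting at index i
def rrun : List Int → Nat → Int
  | [], _ => 0
  | x :: r, 0 => if x = 1 then rrun r 0 + 1 else 0
  | _ :: r, i + 1 => rrun r i

-- the streak length were the zero at index i flipped to 1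
def cfun (a : List Int) (i : Int) : Int := 1 + lrun a i.toNat + rrun a (i.toNat + 1)

def stepA (st : Option Int × Int × Nat) (v : Int) : Option Int × Int × Nat :=
  if (match st.1 with | none => true | some l => decide (l < v)) = true
  then (some v, ((st.2.2 : Nat) : Int), st.2.2 + 1)
  else (st.1, st.2.1, st.2.2 + 1)

def stepB (c : Int → Int) (st : Option Int × Int) (i : Int) : Option Int × Int :=
  match st.1 with
  | none => (some (c i), i)
  | some b => if b < c i then (some (c i), i) else st

lemma leftLoop_eq (a : List Int) : ∀ (m : Nat) (cnt : Int),
    pvLeftLoop a ((m : Int) - 1) cnt = cnt + lrun a m := by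
  intro m
  induction m with
  | zero =>
    intro cnt
    rw [pvLeftLoop]
    simp [lrun]
  | succ i ih =>
    intro cnt
    have hc : ((i + 1 : Nat) : Int) - 1 = (i : Int) := by push_cast; ring
    rw [hc, pvLeftLoop]
    have hp : PySem.List.pyGetD a (i : Int) 0 = a.getD i 0 := PySem.List.pyGetD_natCast a i 0
    by_cases h : a.getD i 0 = 1
    · rw [dif_pos ⟨Int.natCast_nonneg i, by rw [hp, h]⟩, ih]
      rw [show lrun a (i + 1) = lrun a i + 1 from by simp only [lrun, if_pos h]]
      ring
    · rw [dif_neg (by rw [hp]; exact fun hh => h hh.2)]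
      rw [show lrun a (i + 1) = 0 from by simp only [lrun, if_neg h]]
      ring

lemma rrun_out : ∀ (r : List Int) (i : Nat), r.length ≤ i → rrun r i = 0 := by
  intro r
  induction r with
  | nil => intro i _; rfl
  | cons x t ih =>
    intro i hi
    match i, hi with
    | j + 1, hj => exact ih j (by simpa using hj)

lemma rrun_step : ∀ (a : List Int) (i : Nat), i < a.length →
    rrun a i = if a.getD i 0 = 1 then rrun a (i + 1) + 1 else 0 := by
  intro a
  induction a with
  | nil => intro i hi; simp at hi
  | cons x t ih =>
    intro i hi
    match i with
    | 0 =>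
      show rrun (x :: t) 0 = if (x :: t).getD 0 0 = 1 then rrun t 0 + 1 else 0
      simp only [rrun, List.getD_cons_zero]
    | j + 1 =>
      show rrun t j = if (x :: t).getD (j + 1) 0 = 1 then rrun t (j + 1) + 1 else 0
      rw [List.getD_cons_succ]
      exact ih j (by simpa using hi)

lemma rightLoop_eq (a : List Int) : ∀ (m : Nat) (cnt : Int),
    pvRightLoop a (m : Int) cnt = cnt + rrun a m := by
  suffices H : ∀ (k m : Nat) (cnt : Int), a.length - m ≤ k →
      pvRightLoop a (m : Int) cnt = cnt + rrun a m by
    intro m cnt; exact H a.length m cnt (by omega)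
  intro k
  induction k with
  | zero =>
    intro m cnt hk
    rw [pvRightLoop, dif_neg (by intro hh; have := hh.1; omega)]
    rw [rrun_out a m (by omega)]; ring
  | succ k ih =>
    intro m cnt hk
    by_cases hm : m < a.length
    · have hp : PySem.List.pyGetD a (m : Int) 0 = a.getD m 0 := PySem.List.pyGetD_natCast a m 0
      rw [pvRightLoop]
      by_cases h : a.getD m 0 = 1
      · rw [dif_pos ⟨by omega, by rw [hp, h]⟩]
        rw [show ((m : Int) + 1) = ((m + 1 : Nat) : Int) from by push_cast; ring]
        rw [ih (m + 1) (cnt + 1) (by omega)]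
        rw [rrun_step a m hm, if_pos h]; ring
      · rw [dif_neg (by rw [hp]; exact fun hh => h hh.2)]
        rw [rrun_step a m hm, if_neg h]; ring
    · rw [pvRightLoop, dif_neg (by intro hh; have := hh.1; omega)]
      rw [rrun_out a m (by omega)]; ring

lemma buildLeft_getD : ∀ (a : List Int) (i : Nat) (cur : Int), i < a.length →
    (pvBuildLeft a cur).getD i 0 =
      if a.getD i 0 = 1 then (cur :: pvBuildLeft a cur).getD i 0 + 1 else 0 := by
  intro a
  induction a with
  | nil => intro i cur hi; simp at hi
  | cons x t ih =>
    intro i cur hi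
    match i with
    | 0 =>
      show (pvBuildLeft (x :: t) cur).getD 0 0 = if (x :: t).getD 0 0 = 1 then cur + 1 else 0
      simp only [pvBuildLeft, List.getD_cons_zero]
    | j + 1 =>
      show (pvBuildLeft (x :: t) cur).getD (j + 1) 0 =
        if (x :: t).getD (j + 1) 0 = 1 then (pvBuildLeft (x :: t) cur).getD j 0 + 1 else 0
      simp only [pvBuildLeft, List.getD_cons_succ]
      exact ih j _ (by simpa using hi)

lemma leftList_eq (a : List Int) : ∀ (i : Nat), i ≤ a.length →
    (0 :: pvBuildLeft a 0).getD i 0 = lrun a i := by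
  intro i
  induction i with
  | zero => intro _; rfl
  | succ j ih =>
    intro hj
    rw [List.getD_cons_succ, buildLeft_getD a j 0 (by omega)]
    rw [show lrun a (j + 1) = if a.getD j 0 = 1 then lrun a j + 1 else 0 from rfl]
    rw [ih (by omega)]

lemma rightList_eq : ∀ (a : List Int) (i : Nat), (pvBuildRight a).getD i 0 = rrun a i := by
  intro a
  induction a with
  | nil =>
    intro i
    show ([(0 : Int)]).getD i 0 = 0
    match i with
    | 0 => rfl
    | j + 1 => rfl
  | cons x t ih =>
    intro i
    match i with
    | 0 =>
      show (if x = 1 then (pvBuildRight t).headD 0 + 1 else 0) = if x = 1 then rrun t 0 + 1 else 0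
      have hh : (pvBuildRight t).headD 0 = (pvBuildRight t).getD 0 0 := by cases t <;> rfl
      rw [hh, ih 0]
    | j + 1 =>
      show (pvBuildRight t).getD j 0 = rrun t j
      exact ih j

-- the two selection loops agree: A tracks a position into the zeros list, B the index itself
lemma sel (Z : List Int) (c : Int → Int) :
    ∀ (zs : List Int) (j : Nat), zs = Z.drop j →
    ∀ (largest : Option Int) (fidx bAbs : Int),
    (largest.isSome → ∃ k : Nat, fidx = (k : Int) ∧ ∃ h : k < Z.length, bAbs = Z[k]) →
    ((zs.map c).foldl stepA (largest, fidx, j)).1 = (zs.foldl (stepB c) (largest, bAbs)).1 ∧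
    (((zs.map c).foldl stepA (largest, fidx, j)).1.isSome →
      ∃ k : Nat, ((zs.map c).foldl stepA (largest, fidx, j)).2.1 = (k : Int) ∧
        ∃ h : k < Z.length, (zs.foldl (stepB c) (largest, bAbs)).2 = Z[k]) ∧
    ((largest.isSome ∨ zs ≠ []) → ((zs.map c).foldl stepA (largest, fidx, j)).1.isSome) := by
  intro zs
  induction zs with
  | nil =>
    intro j _ largest fidx bAbs hinv
    refine ⟨rfl, ?_, ?_⟩
    · intro hs
      obtain ⟨k, hk1, hk2, hk3⟩ := hinv hs
      exact ⟨k, hk1, hk2, hk3⟩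
    · intro h
      rcases h with h | h
      · exact h
      · exact absurd rfl h
  | cons z zs' ih =>
    intro j hzs largest fidx bAbs hinv
    have hlen : (Z.drop j).length = zs'.length + 1 := by rw [← hzs]; rfl
    have hj : j < Z.length := by
      have := List.length_drop (l := Z) (i := j); omega
    have hd : Z[j] :: Z.drop (j + 1) = Z.drop j := List.getElem_cons_drop (as := Z) (i := j) (h := hj)
    rw [← hd] at hzs
    obtain ⟨hz', hzs'⟩ := List.cons_eq_cons.mp hzs
    have hz : Z[j] = z := hz'.symm
    cases largest with
    | none =>
      have hA : stepA ((none : Option Int), fidx, j) (c z) = (some (c z), (j : Int), j + 1) := rfl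
      have hB : stepB c ((none : Option Int), bAbs) z = (some (c z), z) := rfl
      simp only [List.map_cons, List.foldl_cons, hA, hB]
      have := ih (j + 1) hzs' (some (c z)) (j : Int) z
        (fun _ => ⟨j, rfl, hj, hz.symm⟩)
      exact ⟨this.1, this.2.1, fun _ => this.2.2 (Or.inl rfl)⟩
    | some l =>
      by_cases hlt : l < c z
      · have hA : stepA (some l, fidx, j) (c z) = (some (c z), (j : Int), j + 1) := by
          simp [stepA, hlt]
        have hB : stepB c (some l, bAbs) z = (some (c z), z) := by
          simp [stepB, hlt]
        simp only [List.map_cons, List.foldl_cons, hA, hB]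
        have := ih (j + 1) hzs' (some (c z)) (j : Int) z
          (fun _ => ⟨j, rfl, hj, hz.symm⟩)
        exact ⟨this.1, this.2.1, fun _ => this.2.2 (Or.inl rfl)⟩
      · have hA : stepA (some l, fidx, j) (c z) = (some l, fidx, j + 1) := by
          simp [stepA, hlt]
        have hB : stepB c (some l, bAbs) z = (some l, bAbs) := by
          simp [stepB, hlt]
        simp only [List.map_cons, List.foldl_cons, hA, hB]
        have := ih (j + 1) hzs' (some l) fidx bAbs hinv
        exact ⟨this.1, this.2.1, fun _ => this.2.2 (Or.inl rfl)⟩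

lemma A_closed (a : List Int) :
    longestStreakOfAdjacentOnes a =
      (if ((PySem.List.pyRange 0 (a.length : Int) 1).filter
            (fun i => decide (PySem.List.pyGetD a i 0 = 0))).length = 0 then -1
       else
        let zs := (PySem.List.pyRange 0 (a.length : Int) 1).filter
            (fun i => decide (PySem.List.pyGetD a i 0 = 0))
        PySem.List.pyGetD zs
          ((zs.map (fun idx => pvRightLoop a (idx + 1) (pvLeftLoop a (idx - 1) 1))).foldl
            stepA (none, -1, 0)).2.1 (-1)) := by
  simp only [longestStreakOfAdjacentOnes,
    PySem.List.foldl_append_ite_eq_filter (fun i => PySem.List.pyGetD a i 0 = 0),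
    PySem.List.foldl_append_singleton_eq_map, List.nil_append]
  rfl

lemma B_closed (a : List Int) :
    longestStreakOfAdjacentOnes_alt a =
      (((PySem.List.pyRange 0 (a.length : Int) 1).filter
          (fun i => decide (PySem.List.pyGetD a i 0 = 0))).foldl
        (stepB (cfun a)) (none, -1)).2 := by
  unfold longestStreakOfAdjacentOnes_alt
  rw [show (PySem.List.enumerate a 0) =
        (PySem.List.pyRange 0 (a.length : Int) 1).map (fun j => (j, PySem.List.pyGetD a j 0)) from by
      simpa using PySem.List.enumerate_eq_map_pyRange a 0]
  simp only [PySem.List.foldl_ite_eq_foldl_filter (fun (p : Int × Int) => p.2 = 0)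
      (fun (st : Option Int × Int) (p : Int × Int) =>
        let c := 1 + PySem.List.pyGetD (0 :: pvBuildLeft a 0) p.1 0
            + PySem.List.pyGetD (pvBuildRight a) (p.1 + 1) 0
        match st.1 with
        | none => (some c, p.1)
        | some b => if b < c then (some c, p.1) else st)]
  rw [List.filter_map, List.foldl_map]
  have hmem : ∀ (st : Option Int × Int), ∀ i ∈ (PySem.List.pyRange 0 (a.length : Int) 1).filter
      (fun i => decide (PySem.List.pyGetD a i 0 = 0)),
      (let c := 1 + PySem.List.pyGetD (0 :: pvBuildLeft a 0) i 0
            + PySem.List.pyGetD (pvBuildRight a) (i + 1) 0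
       match st.1 with
       | none => ((some c : Option Int), i)
       | some b => if b < c then (some c, i) else st) = stepB (cfun a) st i := by
    intro st i hi
    have hir := List.mem_filter.mp hi
    have hb := PySem.List.mem_pyRange_one.mp hir.1
    have hm : i = ((i.toNat : Nat) : Int) := by omega
    have htn : i.toNat ≤ a.length := by omega
    have hc : 1 + PySem.List.pyGetD (0 :: pvBuildLeft a 0) i 0
        + PySem.List.pyGetD (pvBuildRight a) (i + 1) 0 = cfun a i := by
      rw [hm, PySem.List.pyGetD_natCast, leftList_eq a i.toNat htn]
      rw [show ((i.toNat : Int) + 1) = ((i.toNat + 1 : Nat) : Int) from by push_cast; ring]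
      rw [PySem.List.pyGetD_natCast, rightList_eq a (i.toNat + 1)]
      simp only [cfun, Int.toNat_natCast]
    show (match st.1 with
       | none => ((some (1 + PySem.List.pyGetD (0 :: pvBuildLeft a 0) i 0
            + PySem.List.pyGetD (pvBuildRight a) (i + 1) 0) : Option Int), i)
       | some b => if b < 1 + PySem.List.pyGetD (0 :: pvBuildLeft a 0) i 0
            + PySem.List.pyGetD (pvBuildRight a) (i + 1) 0
           then (some (1 + PySem.List.pyGetD (0 :: pvBuildLeft a 0) i 0
            + PySem.List.pyGetD (pvBuildRight a) (i + 1) 0), i) else st) = stepB (cfun a) st i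
    rw [hc]
    rfl
  exact congrArg Prod.snd (PySem.List.foldl_congr_mem _ _ (stepB (cfun a)) _ (fun st => hmem st))

-- ===== VERDICT (by name: the statement is the Claim_ definition above) =====
theorem longestStreakOfAdjacentOnes_spec : Claim_equal_longestStreakOfAdjacentOnes := by
  intro a _
  unfold Spec_longestStreakOfAdjacentOnes
  rw [A_closed, B_closed]
  set zs := (PySem.List.pyRange 0 (a.length : Int) 1).filter
      (fun i => decide (PySem.List.pyGetD a i 0 = 0)) with hzs
  by_cases hempty : zs.length = 0
  · rw [if_pos hempty]
    rw [List.length_eq_zero_iff.mp hempty]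
    rfl
  · rw [if_neg hempty]
    have hne : zs ≠ [] := fun h => hempty (by rw [h]; rfl)
    have hcnt : ∀ i ∈ zs, pvRightLoop a (i + 1) (pvLeftLoop a (i - 1) 1) = cfun a i := by
      intro i hi
      have hir := List.mem_filter.mp hi
      have hb := PySem.List.mem_pyRange_one.mp hir.1
      have hm : i = ((i.toNat : Nat) : Int) := by omega
      rw [hm, leftLoop_eq a i.toNat 1]
      rw [show ((i.toNat : Int) + 1) = ((i.toNat + 1 : Nat) : Int) from by push_cast; ring]
      rw [rightLoop_eq a (i.toNat + 1)]
      simp only [cfun, Int.toNat_natCast]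
    show PySem.List.pyGetD zs
        ((zs.map (fun idx => pvRightLoop a (idx + 1) (pvLeftLoop a (idx - 1) 1))).foldl
          stepA (none, -1, 0)).2.1 (-1) = (zs.foldl (stepB (cfun a)) (none, -1)).2
    rw [List.map_congr_left hcnt]
    obtain ⟨heq, hk, hsome⟩ := sel zs (cfun a) zs 0 (List.drop_zero (l := zs)).symm none (-1) (-1)
      (fun h => by simp at h)
    obtain ⟨k, hfi, hklt, hB⟩ := hk (hsome (Or.inr hne))
    rw [hfi, hB, PySem.List.pyGetD_natCast]
    exact List.getD_eq_getElem zs (-1) hklt
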